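-- pv_equiv track=rewrite | github.com/ThalesGroup/agilab | tools/pypi_provenance_check.py | _release_files
-- ===== SOURCE A (Python) =====
-- from typing import Any, Callable, Iterable, Sequence
--
-- def _normalize_version(value: str) -> str:
--     parts = []
--     for part in str(value).strip().split("."):
--         parts.append(str(int(part)) if part.isdigit() else part.lower())
--     return ".".join(parts)
--
-- def _release_files(payload: dict[str, Any], expected_version: str) -> tuple[str | None, list[str]]:
--     releases = payload.get("releases")
--     if not isinstance(releases, dict):
--         return None, []
--     expected = _normalize_version(expected_version)
--     for version, files in releases.items():
--         if _normalize_version(str(version)) != expected: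
--             continue
--         filenames = [
--             str(file.get("filename"))
--             for file in files
--             if isinstance(file, dict) and file.get("filename")
--         ]
--         return str(version), filenames
--     return None, []
-- ===== SOURCE B (Python) =====
-- def _normalize_version(value: str) -> str:
--     return ".".join(
--         str(int(part)) if part.isdigit() else part.lower()
--         for part in str(value).strip().split(".")
--     )
--
-- def _release_files(payload, expected_version):
--     releases = payload.get("releases")
--     if not isinstance(releases, dict):
--         return None, []
--     index = {}
--     for version, files in releases.items():
--         key = _normalize_version(str(version))
--         if key not in index:
--             index[key] = (str(version), files)
--     match = index.get(_normalize_version(expected_version))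
--     if match is None:
--         return None, []
--     version, files = match
--     filenames = [
--         file["filename"]
--         for file in files
--         if isinstance(file, dict) and file.get("filename")
--     ]
--     return version, filenames
-- ===== Notes on version B (the rewrite author's own statement) =====
-- stated objective: alternative
-- what changed: B replaces A's early-return linear scan over releases.items() by building a first-wins dictionary from normalized version to (version, files) in one pass and then doing a single lookup; the filenames comprehension and _normalize_version are also restructured (generator expression / filterMap instead of an accumulating loop).
import Mathlib
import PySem

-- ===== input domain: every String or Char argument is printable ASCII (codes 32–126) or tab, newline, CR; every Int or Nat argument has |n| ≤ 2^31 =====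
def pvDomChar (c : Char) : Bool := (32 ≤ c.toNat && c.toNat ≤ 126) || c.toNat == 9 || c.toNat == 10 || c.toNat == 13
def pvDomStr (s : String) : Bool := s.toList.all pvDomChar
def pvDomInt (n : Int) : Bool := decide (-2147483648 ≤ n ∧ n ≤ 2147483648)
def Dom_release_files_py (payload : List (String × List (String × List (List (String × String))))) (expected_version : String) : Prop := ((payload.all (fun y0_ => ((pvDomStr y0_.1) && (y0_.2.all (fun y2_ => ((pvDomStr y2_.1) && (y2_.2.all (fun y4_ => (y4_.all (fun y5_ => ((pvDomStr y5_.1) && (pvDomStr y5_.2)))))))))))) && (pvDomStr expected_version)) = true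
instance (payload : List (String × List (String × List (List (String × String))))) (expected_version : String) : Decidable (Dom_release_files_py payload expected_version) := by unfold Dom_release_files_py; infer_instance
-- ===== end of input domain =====

-- B replaces A's early-return scan by a first-wins index from normalized version to
-- (version, files) built in one pass, then a single dictionary lookup (objective: alternative).

-- ===== PORT A =====
-- _normalize_version: loop appending normalized parts, then ".".join
-- (part.isdigit() guarantees int(part) succeeds, so the `.getD 0` default is never taken)
def pvNormA (value : String) : String :=
  let parts := (PySem.Str.split? (PySem.Str.strip value) ".").getD []  -- sep "." ≠ "" so split? is some
  let parts := parts.foldl (fun acc part =>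
    acc ++ [if PySem.Str.strIsdigit part then PySem.Int.toStr ((PySem.Int.ofStr? part).getD 0)
            else PySem.Str.lower part]) []
  PySem.Str.join "." parts

-- the filenames list comprehension (isinstance(file, dict) is always true under the typing;
-- str(file.get("filename")) with the truthiness guard is the string itself, default "None" untaken)
def pvFilesA (files : List (List (String × String))) : List String :=
  files.foldl (fun acc file =>
    if (match (PySem.Dict.mk file).get? "filename" with
        | some s => s ≠ ""
        | none => False : Bool) then
      acc ++ [((PySem.Dict.mk file).get? "filename").getD "None"]
    else acc) []

-- the `for version, files in releases.items()` loop with its early return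
def pvLoopA (rs : List (String × List (List (String × String)))) (expected : String) :
    Option String × List String :=
  match rs with
  | [] => (none, [])
  | (version, files) :: rest =>
    if pvNormA version ≠ expected then pvLoopA rest expected
    else (some version, pvFilesA files)

def release_files_py (payload : List (String × List (String × List (List (String × String))))) (expected_version : String) : Option String × List String :=
  match (PySem.Dict.mk payload).get? "releases" with
  | none => (none, [])  -- releases missing: not a dict
  | some releases =>
    let expected := pvNormA expected_version
    pvLoopA releases expected

-- ===== PORT B =====
-- _normalize_version as a single map + join over the split
def pvNormB (value : String) : String :=
  PySem.Str.join "."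
    (((PySem.Str.split? (PySem.Str.strip value) ".").getD []).map (fun part =>
      if PySem.Str.strIsdigit part then PySem.Int.toStr ((PySem.Int.ofStr? part).getD 0)
      else PySem.Str.lower part))

-- filenames comprehension as a filterMap: keep file["filename"] when it is present and truthy
def pvFilesB (files : List (List (String × String))) : List String :=
  files.filterMap (fun file =>
    match (PySem.Dict.mk file).get? "filename" with
    | some s => if s = "" then none else some s
    | none => none)

-- the first-wins index over the releases: `if key not in index: index[key] = (version, files)`
def pvIndexB (rs : List (String × List (List (String × String)))) :
    PySem.Dict String (String × List (List (String × String))) :=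
  rs.foldl (fun d vf =>
    let key := pvNormB vf.1
    if d.contains key then d else d.insert key vf) PySem.Dict.empty

def release_files_py_alt (payload : List (String × List (String × List (List (String × String))))) (expected_version : String) : Option String × List String :=
  match (PySem.Dict.mk payload).get? "releases" with
  | none => (none, [])
  | some releases =>
    match (pvIndexB releases).get? (pvNormB expected_version) with
    | none => (none, [])
    | some (version, files) => (some version, pvFilesB files)

-- ===== PRECONDITION & SPEC =====
def Spec_release_files_py (payload : List (String × List (String × List (List (String × String))))) (expected_version : String) (out : Option String × List String) : Prop := out = release_files_py_alt payload expected_version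
instance (payload : List (String × List (String × List (List (String × String))))) (expected_version : String) (out : Option String × List String) : Decidable (Spec_release_files_py payload expected_version out) := by unfold Spec_release_files_py; infer_instance

-- ===== CLAIM (what is proved, stated in full; the proofs are below) =====
def Claim_equal_release_files_py : Prop := ∀ (payload : List (String × List (String × List (List (String × String))))) (expected_version : String), Dom_release_files_py payload expected_version → Spec_release_files_py payload expected_version (release_files_py payload expected_version)

-- ===== LEMMAS AND PROOFS =====

theorem pvNormA_eq_pvNormB (value : String) : pvNormA value = pvNormB value := by
  simp only [pvNormA, pvNormB]
  rw [PySem.List.foldl_append_singleton_eq_map]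
  simp

theorem pvFilesA_eq_pvFilesB (files : List (List (String × String))) :
    pvFilesA files = pvFilesB files := by
  induction files with
  | nil => rfl
  | cons f rest ih =>
    simp only [pvFilesA, pvFilesB, List.foldl_cons, List.filterMap_cons] at *
    cases h : (PySem.Dict.mk f).get? "filename" with
    | none => simpa [h] using ih
    | some s =>
      by_cases hs : s = "" <;>
        simp_all [PySem.List.foldl_append_if]

-- the first-wins index looked up at k is the first entry whose normalized version is k
theorem get?_pvIndexB_foldl (rs : List (String × List (List (String × String))))
    (d : PySem.Dict String (String × List (List (String × String)))) (k : String) :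
    (rs.foldl (fun d vf =>
        let key := pvNormB vf.1
        if d.contains key then d else d.insert key vf) d).get? k =
      match d.get? k with
      | some x => some x
      | none => rs.find? (fun vf => pvNormB vf.1 == k) := by
  induction rs generalizing d with
  | nil => cases h : d.get? k <;> simp [h]
  | cons vf rest ih =>
    simp only [List.foldl_cons, List.find?]
    rw [ih]
    by_cases hc : (d.contains (pvNormB vf.1)) = true
    · simp only [hc, if_pos]
      rw [PySem.Dict.contains_eq_isSome_get?] at hc
      cases hd : d.get? k with
      | some x => simp
      | none =>
        by_cases hk : pvNormB vf.1 = k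
        · subst hk; simp [hd] at hc
        · have hb : (pvNormB vf.1 == k) = false := by simpa using hk
          simp [hb]
    · simp only [hc, if_neg, Bool.not_eq_true]
      rw [PySem.Dict.get?_insert]
      by_cases hk : k = pvNormB vf.1
      · subst hk
        rw [PySem.Dict.contains_eq_isSome_get?] at hc
        cases hd : d.get? (pvNormB vf.1) with
        | some x => simp [hd] at hc
        | none => simp
      · cases hd : d.get? k with
        | some x => simp [hk]
        | none =>
          have hb : (pvNormB vf.1 == k) = false := by
            simpa using fun h => hk h.symm
          simp [hk, hb]

theorem pvLoopA_eq_find (rs : List (String × List (List (String × String)))) (k : String) :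
    pvLoopA rs k =
      match rs.find? (fun vf => pvNormB vf.1 == k) with
      | none => (none, [])
      | some (v, f) => (some v, pvFilesB f) := by
  induction rs with
  | nil => rfl
  | cons vf rest ih =>
    obtain ⟨v, f⟩ := vf
    simp only [pvLoopA, List.find?, pvNormA_eq_pvNormB]
    by_cases hk : pvNormB v = k
    · have hb : (pvNormB v == k) = true := by simpa using hk
      rw [if_neg (by simp [hk]), hb]
      rw [pvFilesA_eq_pvFilesB]
    · have hb : (pvNormB v == k) = false := by simpa using hk
      rw [if_pos hk, hb]
      exact ih

-- ===== VERDICT (by name: the statement is the Claim_ definition above) =====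
theorem release_files_py_spec : Claim_equal_release_files_py := by
  intro payload expected_version _
  show release_files_py payload expected_version = release_files_py_alt payload expected_version
  unfold release_files_py release_files_py_alt
  cases h : (PySem.Dict.mk payload).get? "releases" with
  | none => rfl
  | some releases =>
    dsimp only
    rw [pvNormA_eq_pvNormB, pvLoopA_eq_find]
    unfold pvIndexB
    rw [get?_pvIndexB_foldl, PySem.Dict.get?_empty]
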